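-- pv_equiv track=rewrite | github.com/TYjacoby71/BatchTrack | app/services/developer/deletion_utils.py | _topological_child_first
-- ===== SOURCE A (Python) =====
-- from collections import deque
-- from typing import Iterable, Sequence
--
-- def _topological_child_first(nodes: Sequence[str], dependencies: dict[str, set[str]]) -> list[str]:
--     node_set = set(nodes)
--     indegree = {node: 0 for node in node_set}
--     adjacency: dict[str, set[str]] = {node: set() for node in node_set}
--
--     for child, parents in dependencies.items():
--         if child not in node_set:
--             continue
--         for parent in parents:
--             if parent not in node_set or parent == child:
--                 continue
--             adjacency[child].add(parent)
--             indegree[parent] += 1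
--
--     queue = deque(sorted(node for node, count in indegree.items() if count == 0))
--     ordered: list[str] = []
--     while queue:
--         node = queue.popleft()
--         ordered.append(node)
--         for parent in sorted(adjacency[node]):
--             indegree[parent] -= 1
--             if indegree[parent] == 0:
--                 queue.append(parent)
--
--     if len(ordered) != len(node_set):
--         remaining = sorted(node_set.difference(ordered))
--         ordered.extend(remaining)
--
--     return ordered
-- ===== SOURCE B (Python) =====
-- def _topological_child_first(nodes, dependencies):
--     node_set = set(nodes)
--     parents_of = {}
--     children_of = {n: set() for n in node_set}
--     for child, parents in dependencies.items():
--         if child not in node_set: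
--             continue
--         kept = {p for p in parents if p in node_set and p != child}
--         parents_of[child] = sorted(kept)
--         for p in kept:
--             children_of[p].add(child)
--
--     # a node is ready exactly when every one of its children is already emitted:
--     # no indegree counters; readiness is a subset test against the emitted set.
--     ordered = sorted(n for n in node_set if not children_of[n])
--     done = set()
--     i = 0
--     while i < len(ordered):
--         c = ordered[i]
--         i += 1
--         done.add(c)
--         for p in parents_of.get(c, ()):
--             if children_of[p] <= done:
--                 ordered.append(p)
--
--     if len(ordered) != len(node_set):
--         ordered.extend(sorted(node_set.difference(ordered)))
--     return ordered
-- ===== Notes on version B (the rewrite author's own statement) =====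
-- stated objective: alternative
-- what changed: Removes the indegree counters and the decrement bookkeeping entirely: B builds reverse edges (children_of) and uses the output list as its own worklist, emitting a parent as soon as the set of its children becomes a subset of the emitted set; the cycle fallback is unchanged.
import Mathlib
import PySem

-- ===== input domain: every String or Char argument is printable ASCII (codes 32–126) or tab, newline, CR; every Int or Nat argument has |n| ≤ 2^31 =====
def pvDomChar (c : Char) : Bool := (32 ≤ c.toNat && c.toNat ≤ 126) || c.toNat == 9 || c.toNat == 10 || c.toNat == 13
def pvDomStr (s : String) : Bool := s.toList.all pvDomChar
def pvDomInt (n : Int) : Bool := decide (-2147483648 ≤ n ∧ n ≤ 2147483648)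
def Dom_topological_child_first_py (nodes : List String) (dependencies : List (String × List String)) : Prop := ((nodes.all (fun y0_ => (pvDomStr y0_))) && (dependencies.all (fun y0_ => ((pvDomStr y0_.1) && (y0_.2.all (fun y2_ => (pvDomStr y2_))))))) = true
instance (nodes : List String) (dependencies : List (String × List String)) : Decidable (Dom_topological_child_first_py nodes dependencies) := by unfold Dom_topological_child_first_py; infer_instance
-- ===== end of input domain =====

-- B removes A's indegree counters and decrement bookkeeping: it builds reverse edges
-- (children_of) and emits a parent as soon as its child set is a subset of the emitted
-- set, using the output list as its own worklist; objective: alternative mechanism.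

-- ===== PORT A =====
-- (all sorts use key = String.toList: the same code-point order as Lean's String `<`, but kernel-reducible)
-- build phase: node_set = set(nodes); indegree = {n:0}; adjacency = {n:set()};
-- then the dependencies loop (state = (indegree, adjacency)).
-- indegree[parent] += 1 is Dict.modify parent 0 (·+1): exact because parent ∈ node_set = keys of indegree.
def pvBuildA (nodeSet : PySem.Set String) (dependencies : List (String × List String)) :
    PySem.Dict String Int × PySem.Dict String (PySem.Set String) :=
  let indeg0 : PySem.Dict String Int := nodeSet.foldl (fun d n => d.insert n 0) PySem.Dict.empty
  let adj0 : PySem.Dict String (PySem.Set String) := nodeSet.foldl (fun d n => d.insert n PySem.Set.empty) PySem.Dict.empty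
  dependencies.foldl (fun st cp =>
    if PySem.Set.contains nodeSet cp.1 then
      cp.2.foldl (fun st2 p =>
        if !(PySem.Set.contains nodeSet p) || p == cp.1 then st2
        else (st2.1.modify p 0 (· + 1), st2.2.modify cp.1 PySem.Set.empty (fun s => PySem.Set.add s p)))
        st
    else st) (indeg0, adj0)

-- the while-queue loop; fuel is a totality device only (2*|node_set|+1 pops can never be
-- exhausted, since every node is enqueued at most once)
def pvKahnA (fuel : Nat) (queue : List String) (indeg : PySem.Dict String Int)
    (adj : PySem.Dict String (PySem.Set String)) : List String :=
  match fuel, queue with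
  | 0, _ => []
  | _ + 1, [] => []
  | f + 1, node :: rest =>
      let r := (PySem.List.sorted (adj.getD node PySem.Set.empty) (fun x => x.toList) false).foldl
        (fun (st2 : PySem.Dict String Int × List String) p =>
          let d := st2.1.modify p 0 (· - 1)          -- indegree[parent] -= 1 (parent is always a key)
          if d.getD p 0 == 0 then (d, st2.2 ++ [p]) else (d, st2.2))
        (indeg, [])
      node :: pvKahnA f (rest ++ r.2) r.1 adj

def topological_child_first_py (nodes : List String) (dependencies : List (String × List String)) : List String :=
  let nodeSet : PySem.Set String := PySem.Set.ofList nodes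
  let b := pvBuildA nodeSet dependencies
  let queue := PySem.List.sorted ((b.1.items.filter (fun kv => kv.2 == 0)).map (·.1)) (fun x => x.toList) false
  let ordered := pvKahnA (2 * nodeSet.length + 1) queue b.1 b.2
  if ordered.length ≠ nodeSet.length then
    ordered ++ PySem.List.sorted (PySem.Set.diff nodeSet ordered) (fun x => x.toList) false
  else ordered

-- ===== PORT B =====
-- kept = {p for p in parents if p in node_set and p != child}
def pvKeptB (ns : PySem.Set String) (child : String) (ps : List String) : PySem.Set String :=
  ps.foldl (fun s p => if PySem.Set.contains ns p && p != child then PySem.Set.add s p else s)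
    PySem.Set.empty

-- build phase: parents_of[child] = sorted(kept); children_of[p].add(child) for p in kept
-- (state = (parents_of, children_of); children_of starts as {n: set()})
def pvBuildB (ns : PySem.Set String) (dependencies : List (String × List String)) :
    PySem.Dict String (List String) × PySem.Dict String (PySem.Set String) :=
  let ch0 : PySem.Dict String (PySem.Set String) := ns.foldl (fun d n => d.insert n PySem.Set.empty) PySem.Dict.empty
  dependencies.foldl (fun st cp =>
    if PySem.Set.contains ns cp.1 then
      let kept := pvKeptB ns cp.1 cp.2
      (st.1.insert cp.1 (PySem.List.sorted kept (fun x => x.toList) false),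
       kept.foldl (fun d p => d.modify p PySem.Set.empty (fun s => PySem.Set.add s cp.1)) st.2)
    else st) (PySem.Dict.empty, ch0)

-- 'while i < len(ordered)' with appends inside, ported as recursion on the unread suffix
-- (queue = ordered[i:], done = the emitted set); fuel is a totality device only
def pvLoopB (parents : PySem.Dict String (List String))
    (childrenOf : PySem.Dict String (PySem.Set String)) :
    Nat → PySem.Set String → List String → List String
  | 0, _, _ => []
  | _ + 1, _, [] => []
  | f + 1, done, c :: rest =>
      let done' := PySem.Set.add done c
      let freed := (parents.getD c []).filter
        (fun p => PySem.Set.issubset (childrenOf.getD p PySem.Set.empty) done')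
      c :: pvLoopB parents childrenOf f done' (rest ++ freed)

def topological_child_first_py_alt (nodes : List String) (dependencies : List (String × List String)) : List String :=
  let nodeSet : PySem.Set String := PySem.Set.ofList nodes
  let b := pvBuildB nodeSet dependencies
  let frontier := PySem.List.sorted (nodeSet.filter (fun n => (b.2.getD n PySem.Set.empty).isEmpty))
    (fun x => x.toList) false
  let ordered := pvLoopB b.1 b.2 (2 * nodeSet.length + 1) PySem.Set.empty frontier
  if ordered.length ≠ nodeSet.length then
    ordered ++ PySem.List.sorted (PySem.Set.diff nodeSet ordered) (fun x => x.toList) false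
  else ordered

-- ===== PRECONDITION & SPEC =====
-- Pre_ excludes association lists whose dict part repeats a key or whose set parts repeat an
-- element: those do not encode any Python dict[str, set[str]] value (dicts/sets cannot hold
-- duplicates), so A's behaviour on them is an artefact of the encoding.
def Pre_topological_child_first_py (nodes : List String) (dependencies : List (String × List String)) : Prop :=
  (dependencies.map Prod.fst).Nodup ∧ ∀ ps ∈ dependencies.map Prod.snd, ps.Nodup
instance (nodes : List String) (dependencies : List (String × List String)) : Decidable (Pre_topological_child_first_py nodes dependencies) := by unfold Pre_topological_child_first_py; infer_instance

def pvWitness_topological_child_first_py : List String × (List (String × List String)) :=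
  (["a", "b", "c"], [("a", ["b", "c"]), ("b", ["c"])])

def Spec_topological_child_first_py (nodes : List String) (dependencies : List (String × List String)) (out : List String) : Prop := out = topological_child_first_py_alt nodes dependencies
instance (nodes : List String) (dependencies : List (String × List String)) (out : List String) : Decidable (Spec_topological_child_first_py nodes dependencies out) := by unfold Spec_topological_child_first_py; infer_instance

-- ===== CLAIM (what is proved, stated in full; the proofs are below) =====
def Claim_equal_topological_child_first_py : Prop := ∀ (nodes : List String) (dependencies : List (String × List String)), Dom_topological_child_first_py nodes dependencies → Pre_topological_child_first_py nodes dependencies → Spec_topological_child_first_py nodes dependencies (topological_child_first_py nodes dependencies)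

-- ===== LEMMAS AND PROOFS =====

-- the filter both builds apply to a parent list
def pvPred (ns : PySem.Set String) (child p : String) : Bool :=
  PySem.Set.contains ns p && p != child

-- one pop's inner loop of A (decrement each parent, collect those reaching zero)
def pvPop (ps : List String) (st : PySem.Dict String Int × List String) :
    PySem.Dict String Int × List String :=
  ps.foldl (fun st2 p =>
    let d := st2.1.modify p 0 (· - 1)
    if d.getD p 0 == 0 then (d, st2.2 ++ [p]) else (d, st2.2)) st

-- the indegree increments of one dependency entry / of the whole build (A side)
def pvIncs (ns : PySem.Set String) (child : String) (ps : List String)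
    (d : PySem.Dict String Int) : PySem.Dict String Int :=
  ps.foldl (fun d p => if pvPred ns child p then d.modify p 0 (· + 1) else d) d

def pvIndegBuild (ns : PySem.Set String) (deps : List (String × List String))
    (d : PySem.Dict String Int) : PySem.Dict String Int :=
  deps.foldl (fun d cp => if PySem.Set.contains ns cp.1 then pvIncs ns cp.1 cp.2 d else d) d

def pvIndeg0 (ns : PySem.Set String) : PySem.Dict String Int :=
  ns.foldl (fun d n => d.insert n 0) PySem.Dict.empty

lemma pvPop_acc (ps : List String) (d : PySem.Dict String Int) (a : List String) :
    pvPop ps (d, a) = ((pvPop ps (d, [])).1, a ++ (pvPop ps (d, [])).2) := by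
  induction ps generalizing d a with
  | nil => simp [pvPop]
  | cons p ps ih =>
    simp only [pvPop, List.foldl_cons] at ih ⊢
    by_cases h : ((d.modify p 0 (· - 1)).getD p 0 == 0) = true
    · simp only [if_pos h, List.nil_append]
      rw [ih, ih ((d.modify p 0 (· - 1))) [p]]
      simp only [List.append_assoc, List.singleton_append]
    · simp only [if_neg h]
      rw [ih]



lemma pvKahnA_cons (f : Nat) (x : String) (rest : List String) (indeg : PySem.Dict String Int)
    (adj : PySem.Dict String (PySem.Set String)) :
    pvKahnA (f + 1) (x :: rest) indeg adj
      = x :: pvKahnA f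
          (rest ++ (pvPop (PySem.List.sorted (adj.getD x PySem.Set.empty) (fun x => x.toList) false) (indeg, [])).2)
          (pvPop (PySem.List.sorted (adj.getD x PySem.Set.empty) (fun x => x.toList) false) (indeg, [])).1 adj := rfl

-- A's inner dependency loop: indegree projection
lemma pvBuildA_inner_fst (ns : PySem.Set String) (child : String) (ps : List String) :
    ∀ (st : PySem.Dict String Int × PySem.Dict String (PySem.Set String)),
    (ps.foldl (fun st2 p =>
        if !(PySem.Set.contains ns p) || p == child then st2
        else (st2.1.modify p 0 (· + 1), st2.2.modify child PySem.Set.empty (fun s => PySem.Set.add s p)))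
      st).1 = pvIncs ns child ps st.1 := by
  induction ps with
  | nil => intro st; rfl
  | cons p ps ih =>
    intro st
    simp only [List.foldl_cons, pvIncs, List.foldl_cons] at *
    by_cases hc : (!(PySem.Set.contains ns p) || p == child) = true
    · have hp : pvPred ns child p = false := by
        simp only [pvPred, bne]
        revert hc
        cases PySem.Set.contains ns p <;> cases p == child <;> simp
      rw [if_pos hc, if_neg (by simp [hp]), ih]
    · have hp : pvPred ns child p = true := by
        simp only [pvPred, bne]
        revert hc
        cases PySem.Set.contains ns p <;> cases p == child <;> simp
      rw [if_neg hc, if_pos (by simp [hp]), ih]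

-- A's inner dependency loop: adjacency lookups
lemma pvBuildA_inner_snd (ns : PySem.Set String) (child : String) (ps : List String) :
    ∀ (st : PySem.Dict String Int × PySem.Dict String (PySem.Set String)) (c : String),
    (ps.foldl (fun st2 p =>
        if !(PySem.Set.contains ns p) || p == child then st2
        else (st2.1.modify p 0 (· + 1), st2.2.modify child PySem.Set.empty (fun s => PySem.Set.add s p)))
      st).2.getD c PySem.Set.empty
      = if c = child then
          PySem.Set.update (st.2.getD child PySem.Set.empty) (ps.filter (pvPred ns child))
        else st.2.getD c PySem.Set.empty := by
  induction ps with
  | nil =>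
    intro st c
    by_cases h : c = child <;> simp [h, PySem.Set.update]
  | cons p ps ih =>
    intro st c
    simp only [List.foldl_cons]
    by_cases hc : (!(PySem.Set.contains ns p) || p == child) = true
    · have hp : pvPred ns child p = false := by
        simp only [pvPred, bne]
        revert hc
        cases PySem.Set.contains ns p <;> cases p == child <;> simp
      rw [if_pos hc, ih, List.filter_cons_of_neg (by simp [hp])]
    · have hp : pvPred ns child p = true := by
        simp only [pvPred, bne]
        revert hc
        cases PySem.Set.contains ns p <;> cases p == child <;> simp
      rw [if_neg hc, ih, List.filter_cons_of_pos (by simp [hp])]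
      by_cases h : c = child
      · subst h
        rw [if_pos rfl, if_pos rfl, PySem.Dict.getD_modify_self]
        rfl
      · rw [if_neg h, if_neg h]
        simp [PySem.Dict.getD_modify_of_ne, h]

-- B's kept set is the Set.update of ∅ with the pvPred-filtered parent list
lemma pvKeptB_eq (ns : PySem.Set String) (child : String) (ps : List String) :
    pvKeptB ns child ps = PySem.Set.update PySem.Set.empty (ps.filter (pvPred ns child)) := by
  suffices h : ∀ (s : PySem.Set String),
      ps.foldl (fun s p => if PySem.Set.contains ns p && p != child then PySem.Set.add s p else s) s
        = PySem.Set.update s (ps.filter (pvPred ns child)) by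
    exact h PySem.Set.empty
  induction ps with
  | nil => intro s; simp [PySem.Set.update]
  | cons p ps ih =>
    intro s
    simp only [List.foldl_cons]
    by_cases hp : pvPred ns child p = true
    · rw [if_pos (by simpa [pvPred] using hp), List.filter_cons_of_pos (by simp [hp]),
        PySem.Set.update_cons, ih]
    · rw [if_neg (by simpa [pvPred] using hp),
        List.filter_cons_of_neg (by revert hp; cases pvPred ns child p <;> simp), ih]

lemma pvFoldlAdd_nodup (xs : List String) (s : PySem.Set String)
    (hdisj : ∀ x ∈ xs, x ∉ s) (hnd : xs.Nodup) : PySem.Set.update s xs = s ++ xs := by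
  induction xs generalizing s with
  | nil => simp [PySem.Set.update]
  | cons x xs ih =>
    have hx : x ∉ s := hdisj x (List.mem_cons_self)
    have hstep : PySem.Set.update s (x :: xs) = PySem.Set.update (s ++ [x]) xs := by
      simp [PySem.Set.update, PySem.Set.add_of_not_mem hx]
    rw [hstep, ih (s ++ [x])]
    · simp
    · intro y hy
      simp only [List.mem_append, List.mem_singleton]
      rintro (h | rfl)
      · exact hdisj y (List.mem_cons_of_mem _ hy) h
      · exact (List.nodup_cons.mp hnd).1 hy
    · exact (List.nodup_cons.mp hnd).2

-- B's per-entry children_of update, looked up pointwise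
lemma pvChInner (L : List String) (hnd : L.Nodup) (c : String)
    (d : PySem.Dict String (PySem.Set String)) :
    ∀ p, (L.foldl (fun d p => d.modify p PySem.Set.empty (fun s => PySem.Set.add s c)) d).getD p PySem.Set.empty
      = if p ∈ L then PySem.Set.add (d.getD p PySem.Set.empty) c else d.getD p PySem.Set.empty := by
  induction L generalizing d with
  | nil => intro p; simp
  | cons q L ih =>
    intro p
    have hq := List.nodup_cons.mp hnd
    simp only [List.foldl_cons]
    rw [ih hq.2]
    by_cases hpq : p = q
    · subst hpq
      rw [if_neg hq.1, if_pos (List.mem_cons_self), PySem.Dict.getD_modify_self]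
    · rw [PySem.Dict.getD_modify_of_ne _ PySem.Set.empty _ hpq]
      by_cases hpl : p ∈ L
      · rw [if_pos hpl, if_pos (List.mem_cons_of_mem _ hpl)]
      · rw [if_neg hpl, if_neg (by simp [hpq, hpl])]

-- pvIncs, looked up pointwise (per-occurrence counting)
lemma pvIncs_getD (ns : PySem.Set String) (child : String) (ps : List String) :
    ∀ (d : PySem.Dict String Int) (x : String),
    (pvIncs ns child ps d).getD x 0 = d.getD x 0 + ((ps.filter (pvPred ns child)).count x : Int) := by
  induction ps with
  | nil => intro d x; simp [pvIncs]
  | cons p ps ih =>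
    intro d x
    simp only [pvIncs, List.foldl_cons] at ih ⊢
    by_cases hp : pvPred ns child p = true
    · rw [if_pos hp, List.filter_cons_of_pos (by simp [hp]), ih]
      by_cases hx : x = p
      · subst hx
        rw [PySem.Dict.getD_modify_self, List.count_cons_self]
        push_cast
        ring
      · rw [PySem.Dict.getD_modify_of_ne d 0 _ hx]
        simp only [List.count_cons]
        simp [show ¬ p = x from fun e => hx e.symm]
    · rw [if_neg hp, List.filter_cons_of_neg (by revert hp; cases pvPred ns child p <;> simp), ih]

-- getD of an insert-constant fold over ns is the constant or the default
lemma pvAdj0_getD_aux (ns : PySem.Set String) :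
    ∀ (d : PySem.Dict String (PySem.Set String)),
    (∀ x, d.getD x PySem.Set.empty = PySem.Set.empty) →
    ∀ x, (ns.foldl (fun d n => d.insert n PySem.Set.empty) d).getD x PySem.Set.empty
      = PySem.Set.empty := by
  induction ns with
  | nil => intro d hd x; exact hd x
  | cons n ns ihn =>
    intro d hd x
    simp only [List.foldl_cons]
    refine ihn _ ?_ x
    intro y
    by_cases hy : y = n
    · subst hy; simp [PySem.Dict.getD_insert_self]
    · rw [PySem.Dict.getD_insert_of_ne]
      · exact hd y
      · exact hy

lemma pvIndeg0_getD (ns : PySem.Set String) :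
    ∀ (d : PySem.Dict String Int), (∀ x, d.getD x 0 = 0) →
    ∀ x, (ns.foldl (fun d n => d.insert n (0 : Int)) d).getD x 0 = 0 := by
  induction ns with
  | nil => intro d hd x; exact hd x
  | cons n ns ihn =>
    intro d hd x
    simp only [List.foldl_cons]
    refine ihn _ ?_ x
    intro y
    by_cases hy : y = n
    · subst hy; simp [PySem.Dict.getD_insert_self]
    · rw [PySem.Dict.getD_insert_of_ne]
      · exact hd y
      · exact hy

lemma pvIndeg0_keys (ns : PySem.Set String) (hnd : ns.Nodup) : (pvIndeg0 ns).keys = ns := by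
  unfold pvIndeg0
  rw [PySem.Dict.keys_foldl_insert ns (fun _ _ => 0) PySem.Dict.empty]
  have : (PySem.Dict.empty : PySem.Dict String Int).keys = [] := rfl
  rw [this, pvFoldlAdd_nodup ns [] (by simp) hnd]
  simp

lemma pvModify_keys (d : PySem.Dict String Int) (p : String) (f : Int → Int) :
    (d.modify p 0 f).keys = PySem.Set.add d.keys p := by
  have h1 := PySem.Dict.keys_foldl_modify (ν := Int) [p] 0 (fun _ _ v => f v) d
  simpa [PySem.Set.update] using h1

lemma pvIncs_keys (ns : PySem.Set String) (child : String) (ps : List String) :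
    ∀ (d : PySem.Dict String Int), (∀ p, p ∈ ns → p ∈ d.keys) →
    (pvIncs ns child ps d).keys = d.keys := by
  induction ps with
  | nil => intro d _; rfl
  | cons p ps ih =>
    intro d h
    simp only [pvIncs, List.foldl_cons] at *
    by_cases hp : pvPred ns child p = true
    · rw [if_pos hp]
      have hpns : p ∈ ns := by
        have hp' : (PySem.Set.contains ns p && (p != child)) = true := by simpa [pvPred] using hp
        exact (PySem.Set.contains_iff _ _).mp ((Bool.and_eq_true _ _).mp hp').1
      have hkeq : (d.modify p 0 (· + 1)).keys = d.keys := by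
        rw [pvModify_keys, PySem.Set.add_of_mem (h p hpns)]
      rw [ih _ (by intro q hq; rw [hkeq]; exact h q hq), hkeq]
    · rw [if_neg hp]
      exact ih d h

lemma pvIndegBuild_keys (ns : PySem.Set String) (deps : List (String × List String))
    (d : PySem.Dict String Int) (h : ∀ p, p ∈ ns → p ∈ d.keys) :
    (pvIndegBuild ns deps d).keys = d.keys := by
  induction deps generalizing d with
  | nil => rfl
  | cons cp l ih =>
    simp only [pvIndegBuild, List.foldl_cons] at *
    by_cases hc : PySem.Set.contains ns cp.1 = true
    · rw [if_pos hc]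
      have hkeq := pvIncs_keys ns cp.1 cp.2 d h
      rw [ih _ (by intro q hq; rw [hkeq]; exact h q hq), hkeq]
    · rw [if_neg hc]
      exact ih d h

-- indegree projection of A's build
lemma pvBuildA_fst (ns : PySem.Set String) (deps : List (String × List String)) :
    (pvBuildA ns deps).1 = pvIndegBuild ns deps (pvIndeg0 ns) := by
  suffices h : ∀ (l : List (String × List String)) (st : PySem.Dict String Int × PySem.Dict String (PySem.Set String)),
      (l.foldl (fun st cp =>
        if PySem.Set.contains ns cp.1 then
          cp.2.foldl (fun st2 p =>
            if !(PySem.Set.contains ns p) || p == cp.1 then st2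
            else (st2.1.modify p 0 (· + 1), st2.2.modify cp.1 PySem.Set.empty (fun s => PySem.Set.add s p)))
            st
        else st) st).1 = pvIndegBuild ns l st.1 by
    exact h deps _
  intro l
  induction l with
  | nil => intro st; rfl
  | cons cp l ih =>
    intro st
    simp only [List.foldl_cons, pvIndegBuild, List.foldl_cons] at *
    by_cases hc : PySem.Set.contains ns cp.1 = true
    · rw [if_pos hc, if_pos hc, ih, pvBuildA_inner_fst]
    · rw [if_neg hc, if_neg hc, ih]

-- the two initial frontiers agree (same indegree dict on both sides)
lemma pvFrontier_eq (ns : PySem.Set String) (ind : PySem.Dict String Int)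
    (hkeys : ind.keys = ns) (hnd : ns.Nodup) :
    ((ind.items.filter (fun kv => kv.2 == 0)).map (·.1)) = ns.filter (fun n => ind.getD n 0 == 0) := by
  rw [PySem.Dict.items_eq_map_keys ind (by rw [hkeys]; exact hnd) 0, hkeys, List.filter_map,
    List.map_map]
  simp only [Function.comp_def]
  simp

-- THE GRAND BUILD INVARIANT: walking both builds together, A's adjacency sorts to B's
-- parents lists, B's parents/children dicts are mutually inverse edge relations, and A's
-- indegree of x is exactly the size of B's child set of x (needs Pre_: nodup encodings).
lemma pvBuild_grand (ns : PySem.Set String) :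
    ∀ (l : List (String × List String))
      (stA : PySem.Dict String Int × PySem.Dict String (PySem.Set String))
      (stB : PySem.Dict String (List String) × PySem.Dict String (PySem.Set String)),
    (l.map Prod.fst).Nodup →
    (∀ ps ∈ l.map Prod.snd, ps.Nodup) →
    (∀ cp ∈ l, stA.2.getD cp.1 PySem.Set.empty = PySem.Set.empty) →
    (∀ cp ∈ l, ∀ p, cp.1 ∉ stB.2.getD p PySem.Set.empty) →
    (∀ c, PySem.List.sorted (stA.2.getD c PySem.Set.empty) (fun x => x.toList) false = stB.1.getD c []) →
    (∀ c, (stA.2.getD c PySem.Set.empty).Nodup) →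
    (∀ p, (stB.2.getD p PySem.Set.empty).Nodup) →
    (∀ c p, p ∈ stB.1.getD c [] ↔ c ∈ stB.2.getD p PySem.Set.empty) →
    (∀ p, p ∉ stB.2.getD p PySem.Set.empty) →
    (∀ x, stA.1.getD x 0 = ((stB.2.getD x PySem.Set.empty).length : Int)) →
    (let rA := l.foldl (fun st cp =>
        if PySem.Set.contains ns cp.1 then
          cp.2.foldl (fun st2 p =>
            if !(PySem.Set.contains ns p) || p == cp.1 then st2
            else (st2.1.modify p 0 (· + 1), st2.2.modify cp.1 PySem.Set.empty (fun s => PySem.Set.add s p)))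
            st
        else st) stA
     let rB := l.foldl (fun st cp =>
        if PySem.Set.contains ns cp.1 then
          let kept := pvKeptB ns cp.1 cp.2
          (st.1.insert cp.1 (PySem.List.sorted kept (fun x => x.toList) false),
           kept.foldl (fun d p => d.modify p PySem.Set.empty (fun s => PySem.Set.add s cp.1)) st.2)
        else st) stB
     (∀ c, PySem.List.sorted (rA.2.getD c PySem.Set.empty) (fun x => x.toList) false = rB.1.getD c []) ∧
     (∀ c, (rA.2.getD c PySem.Set.empty).Nodup) ∧
     (∀ p, (rB.2.getD p PySem.Set.empty).Nodup) ∧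
     (∀ c p, p ∈ rB.1.getD c [] ↔ c ∈ rB.2.getD p PySem.Set.empty) ∧
     (∀ p, p ∉ rB.2.getD p PySem.Set.empty) ∧
     (∀ x, rA.1.getD x 0 = ((rB.2.getD x PySem.Set.empty).length : Int))) := by
  intro l
  induction l with
  | nil =>
    intro stA stB _ _ _ _ h5 h6 h7 h8 h9 h10
    exact ⟨h5, h6, h7, h8, h9, h10⟩
  | cons cp l ih =>
    intro stA stB h1 h2 h3 h4 h5 h6 h7 h8 h9 h10
    rw [List.map_cons] at h1
    have hk := List.nodup_cons.mp h1
    simp only [List.foldl_cons]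
    by_cases hc : PySem.Set.contains ns cp.1 = true
    · rw [if_pos hc, if_pos hc]
      -- facts about this entry
      have hFnd : (cp.2.filter (pvPred ns cp.1)).Nodup :=
        (h2 cp.2 (by simp)).filter _
      have hupd : PySem.Set.update PySem.Set.empty (cp.2.filter (pvPred ns cp.1))
          = cp.2.filter (pvPred ns cp.1) := by
        rw [PySem.Set.update_empty, PySem.Set.ofList_eq_self_of_nodup _ hFnd]
      have hkept : pvKeptB ns cp.1 cp.2 = cp.2.filter (pvPred ns cp.1) := by
        rw [pvKeptB_eq]
        exact hupd
      have hkept_nd : (pvKeptB ns cp.1 cp.2).Nodup := by rw [hkept]; exact hFnd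
      have hkept_ne : ∀ p ∈ pvKeptB ns cp.1 cp.2, p ≠ cp.1 := by
        intro p hp
        rw [hkept] at hp
        have := (List.mem_filter.mp hp).2
        simp only [pvPred, Bool.and_eq_true, bne_iff_ne] at this
        exact this.2
      -- the two new states
      have hA2 : ∀ c, ((cp.2.foldl (fun st2 p =>
          if !(PySem.Set.contains ns p) || p == cp.1 then st2
          else (st2.1.modify p 0 (· + 1), st2.2.modify cp.1 PySem.Set.empty (fun s => PySem.Set.add s p)))
            stA).2).getD c PySem.Set.empty
          = if c = cp.1 then pvKeptB ns cp.1 cp.2 else stA.2.getD c PySem.Set.empty := by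
        intro c
        rw [pvBuildA_inner_snd]
        by_cases hcc : c = cp.1
        · rw [if_pos hcc, if_pos hcc, h3 cp (by simp), hkept]
          exact hupd
        · rw [if_neg hcc, if_neg hcc]
      have hA1 : ((cp.2.foldl (fun st2 p =>
          if !(PySem.Set.contains ns p) || p == cp.1 then st2
          else (st2.1.modify p 0 (· + 1), st2.2.modify cp.1 PySem.Set.empty (fun s => PySem.Set.add s p)))
            stA).1) = pvIncs ns cp.1 cp.2 stA.1 := pvBuildA_inner_fst ns cp.1 cp.2 stA
      have hB2 : ∀ p, (((pvKeptB ns cp.1 cp.2).foldl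
            (fun d p => d.modify p PySem.Set.empty (fun s => PySem.Set.add s cp.1)) stB.2)).getD p PySem.Set.empty
          = if p ∈ pvKeptB ns cp.1 cp.2 then PySem.Set.add (stB.2.getD p PySem.Set.empty) cp.1
            else stB.2.getD p PySem.Set.empty :=
        pvChInner _ hkept_nd cp.1 stB.2
      -- apply the induction hypothesis to the new states
      refine ih _ _ hk.2 (fun ps hps => h2 ps (by simp [hps])) ?_ ?_ ?_ ?_ ?_ ?_ ?_ ?_
      · -- unprocessed A-adjacency entries still empty
        intro cq hcq
        rw [hA2]
        have hne : cq.1 ≠ cp.1 := by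
          intro e
          exact hk.1 (e ▸ List.mem_map_of_mem hcq)
        rw [if_neg hne]
        exact h3 cq (List.mem_cons_of_mem _ hcq)
      · -- unprocessed keys still absent from all child sets
        intro cq hcq p
        rw [hB2]
        have hne : cq.1 ≠ cp.1 := by
          intro e
          exact hk.1 (e ▸ List.mem_map_of_mem hcq)
        by_cases hp : p ∈ pvKeptB ns cp.1 cp.2
        · rw [if_pos hp, PySem.Set.mem_add]
          rintro (hin | he)
          · exact h4 cq (List.mem_cons_of_mem _ hcq) p hin
          · exact hne he
        · rw [if_neg hp]
          exact h4 cq (List.mem_cons_of_mem _ hcq) p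
      · -- sorted A-adjacency = B-parents
        intro c
        rw [hA2]
        by_cases hcc : c = cp.1
        · subst hcc
          rw [if_pos rfl, PySem.Dict.getD_insert_self]
        · rw [if_neg hcc, PySem.Dict.getD_insert_of_ne _ _ _ hcc]
          exact h5 c
      · -- A-adjacency sets nodup
        intro c
        rw [hA2]
        by_cases hcc : c = cp.1
        · rw [if_pos hcc]; exact hkept_nd
        · rw [if_neg hcc]; exact h6 c
      · -- B child sets nodup
        intro p
        rw [hB2]
        by_cases hp : p ∈ pvKeptB ns cp.1 cp.2
        · rw [if_pos hp]; exact PySem.Set.nodup_add _ _ (h7 p)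
        · rw [if_neg hp]; exact h7 p
      · -- parents/children mutually inverse
        intro c p
        rw [hB2]
        by_cases hcc : c = cp.1
        · subst hcc
          rw [PySem.Dict.getD_insert_self]
          by_cases hp : p ∈ pvKeptB ns cp.1 cp.2
          · rw [if_pos hp]
            simp [PySem.List.mem_sorted, PySem.Set.mem_add, hp]
          · rw [if_neg hp]
            simp only [PySem.List.mem_sorted]
            constructor
            · intro h; exact absurd h hp
            · intro h; exact absurd h (h4 cp (by simp) p)
        · rw [PySem.Dict.getD_insert_of_ne _ _ _ hcc]
          by_cases hp : p ∈ pvKeptB ns cp.1 cp.2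
          · rw [if_pos hp, PySem.Set.mem_add]
            constructor
            · intro h; left; exact (h8 c p).mp h
            · rintro (h | he)
              · exact (h8 c p).mpr h
              · exact absurd he hcc
          · rw [if_neg hp]
            exact h8 c p
      · -- no self-children
        intro p
        rw [hB2]
        by_cases hp : p ∈ pvKeptB ns cp.1 cp.2
        · rw [if_pos hp, PySem.Set.mem_add]
          rintro (hin | he)
          · exact h9 p hin
          · exact hkept_ne p hp he
        · rw [if_neg hp]
          exact h9 p
      · -- indegree = child-set size
        intro x
        rw [hA1, pvIncs_getD, hB2, h10 x]
        by_cases hx : x ∈ pvKeptB ns cp.1 cp.2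
        · rw [if_pos hx, PySem.Set.add_of_not_mem (h4 cp (by simp) x),
            List.count_eq_one_of_mem hFnd (hkept ▸ hx)]
          push_cast [List.length_append, List.length_singleton]
          ring
        · rw [if_neg hx, List.count_eq_zero_of_not_mem (fun h => hx (hkept ▸ h))]
          push_cast
          ring
    · rw [if_neg hc, if_neg hc]
      exact ih _ _ hk.2 (fun ps hps => h2 ps (by simp [hps]))
        (fun cq hcq => h3 cq (List.mem_cons_of_mem _ hcq))
        (fun cq hcq => h4 cq (List.mem_cons_of_mem _ hcq)) h5 h6 h7 h8 h9 h10

-- A's pop loop over a nodup parent list: the freed nodes are a filter, the dict a decrement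
lemma pvPop_spec (L : List String) (hnd : L.Nodup) (d : PySem.Dict String Int) :
    (pvPop L (d, [])).2 = L.filter (fun p => d.getD p 0 == (1 : Int)) ∧
    (∀ x, (pvPop L (d, [])).1.getD x 0 = d.getD x 0 - (if x ∈ L then 1 else 0)) := by
  induction L generalizing d with
  | nil => exact ⟨rfl, fun x => by simp [pvPop]⟩
  | cons p L ih =>
    have h := List.nodup_cons.mp hnd
    obtain ⟨ih1, ih2⟩ := ih h.2 (d.modify p 0 (· - 1))
    have hd1 : (d.modify p 0 (· - 1)).getD p 0 = d.getD p 0 - 1 := by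
      rw [PySem.Dict.getD_modify_self]
    have htest : ((d.modify p 0 (· - 1)).getD p 0 == (0 : Int)) = (d.getD p 0 == (1 : Int)) := by
      rw [Bool.eq_iff_iff]
      simp only [beq_iff_eq, hd1]
      omega
    have hstep : pvPop (p :: L) (d, []) =
        pvPop L ((d.modify p 0 (· - 1)), if d.getD p 0 == (1 : Int) then [p] else []) := by
      simp only [pvPop, List.foldl_cons, htest]
      by_cases ht : (d.getD p 0 == (1 : Int)) = true
      · rw [if_pos ht, if_pos ht]; rfl
      · rw [if_neg ht, if_neg ht]
    have hfc : L.filter (fun q => (d.modify p 0 (· - 1)).getD q 0 == (1 : Int))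
        = L.filter (fun q => d.getD q 0 == (1 : Int)) := by
      apply List.filter_congr
      intro q hq
      rw [PySem.Dict.getD_modify_of_ne _ 0 _ (by intro e; exact h.1 (e ▸ hq))]
    constructor
    · rw [hstep, pvPop_acc, ih1, hfc, List.filter_cons]
      by_cases ht : (d.getD p 0 == (1 : Int)) = true
      · rw [if_pos ht, if_pos ht]; rfl
      · rw [if_neg ht, if_neg ht]; simp
    · intro x
      rw [hstep, pvPop_acc]
      have := ih2 x
      simp only [this]
      by_cases hx : x = p
      · subst hx
        rw [hd1, if_neg h.1, if_pos List.mem_cons_self]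
        omega
      · rw [PySem.Dict.getD_modify_of_ne d 0 _ hx]
        by_cases hxl : x ∈ L
        · rw [if_pos hxl, if_pos (List.mem_cons_of_mem _ hxl)]
        · rw [if_neg hxl, if_neg (by simp [hx, hxl])]

-- counting survivors after adding one fresh element to done
lemma pvCnt_add (l : List String) (hnd : l.Nodup) (done : PySem.Set String) (c : String)
    (hc : c ∉ done) :
    ((l.filter (fun y => !(PySem.Set.contains (PySem.Set.add done c) y))).length : Int)
      = ((l.filter (fun y => !(PySem.Set.contains done y))).length : Int) - (if c ∈ l then 1 else 0) := by
  have hcont : ∀ y, PySem.Set.contains (PySem.Set.add done c) y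
      = (PySem.Set.contains done y || y == c) := by
    intro y
    rw [PySem.Set.add_of_not_mem hc]
    cases hyc : (y == c) <;> simp_all [PySem.Set.contains]
  have hcf : PySem.Set.contains done c = false := by
    cases hcc : PySem.Set.contains done c
    · rfl
    · exact absurd ((PySem.Set.contains_iff _ _).mp hcc) hc
  induction l with
  | nil => simp
  | cons y l ih =>
    have h := List.nodup_cons.mp hnd
    have ihl := ih h.2
    by_cases hyc : y = c
    · subst hyc
      have h1 : (!(PySem.Set.contains (PySem.Set.add done y) y)) = false := by
        rw [hcont]; simp
      have h2 : (!(PySem.Set.contains done y)) = true := by rw [hcf]; rfl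
      rw [List.filter_cons, h1, List.filter_cons, h2, if_pos List.mem_cons_self]
      have h3 : l.filter (fun z => !(PySem.Set.contains (PySem.Set.add done y) z))
          = l.filter (fun z => !(PySem.Set.contains done z)) := by
        apply List.filter_congr
        intro z hz
        rw [hcont, show (z == y) = false by simp; exact fun e => h.1 (e ▸ hz)]
        simp
      rw [h3]
      rw [if_neg (by simp), if_pos rfl]
      push_cast [List.length_cons]
      ring
    · have h4 : (!(PySem.Set.contains (PySem.Set.add done c) y)) = (!(PySem.Set.contains done y)) := by
        rw [hcont, show (y == c) = false by simp [hyc]]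
        simp
      have h5 : (if c ∈ y :: l then (1 : Int) else 0) = (if c ∈ l then 1 else 0) := by
        by_cases hcl : c ∈ l
        · rw [if_pos hcl, if_pos (List.mem_cons_of_mem _ hcl)]
        · rw [if_neg hcl, if_neg (by simp [hcl]; exact fun e => hyc e.symm)]
      rw [List.filter_cons, List.filter_cons, h4, h5]
      by_cases hcl : c ∈ l
      · rw [if_pos hcl]
        rw [if_pos hcl] at ihl
        by_cases hy : (!(PySem.Set.contains done y)) = true
        · rw [if_pos hy, if_pos hy]
          push_cast [List.length_cons]
          omega
        · rw [if_neg hy, if_neg hy]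
          exact ihl
      · rw [if_neg hcl]
        rw [if_neg hcl] at ihl
        by_cases hy : (!(PySem.Set.contains done y)) = true
        · rw [if_pos hy, if_pos hy]
          push_cast [List.length_cons]
          omega
        · rw [if_neg hy, if_neg hy]
          exact ihl

-- THE LOOP EQUIVALENCE: A's counter-driven Kahn loop equals B's subset-test loop
lemma pvLoop_eq (adjA : PySem.Dict String (PySem.Set String))
    (parentsB : PySem.Dict String (List String)) (chB : PySem.Dict String (PySem.Set String))
    (hG : ∀ c, PySem.List.sorted (adjA.getD c PySem.Set.empty) (fun x => x.toList) false = parentsB.getD c [])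
    (hGnd : ∀ c, (parentsB.getD c []).Nodup)
    (hpar : ∀ c p, p ∈ parentsB.getD c [] ↔ c ∈ chB.getD p PySem.Set.empty)
    (hchnd : ∀ p, (chB.getD p PySem.Set.empty).Nodup)
    (hirr : ∀ p, p ∉ chB.getD p PySem.Set.empty) :
    ∀ (fuel : Nat) (queue : List String) (done : PySem.Set String) (indeg : PySem.Dict String Int),
    queue.Nodup →
    (∀ p ∈ queue, p ∉ done ∧ ∀ c ∈ chB.getD p PySem.Set.empty, c ∈ done) →
    (∀ p, p ∈ done → ∀ c ∈ chB.getD p PySem.Set.empty, c ∈ done) →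
    (∀ x, indeg.getD x 0 = (((chB.getD x PySem.Set.empty).filter (fun y => !(PySem.Set.contains done y))).length : Int)) →
    pvKahnA fuel queue indeg adjA = pvLoopB parentsB chB fuel done queue := by
  intro fuel
  induction fuel with
  | zero =>
    intro queue done indeg _ _ _ _
    cases queue <;> rfl
  | succ f ih =>
    intro queue done indeg hq hmem hcl hind
    cases queue with
    | nil => rfl
    | cons c rest =>
      obtain ⟨hcd, hcch⟩ := hmem c List.mem_cons_self
      have hqr := List.nodup_cons.mp hq
      obtain ⟨hp2, hp1⟩ := pvPop_spec (parentsB.getD c []) (hGnd c) indeg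
      -- the two freed lists coincide
      have hfe : (pvPop (parentsB.getD c []) (indeg, [])).2
          = (parentsB.getD c []).filter
              (fun p => PySem.Set.issubset (chB.getD p PySem.Set.empty) (PySem.Set.add done c)) := by
        rw [hp2]
        apply List.filter_congr
        intro p hpG
        have hcp : c ∈ chB.getD p PySem.Set.empty := (hpar c p).mp hpG
        rw [Bool.eq_iff_iff]
        have hcnt := pvCnt_add (chB.getD p PySem.Set.empty) (hchnd p) done c hcd
        rw [if_pos hcp] at hcnt
        have hz : (((chB.getD p PySem.Set.empty).filter
              (fun y => !(PySem.Set.contains (PySem.Set.add done c) y))).length = 0)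
            ↔ ∀ x ∈ chB.getD p PySem.Set.empty, x ∈ PySem.Set.add done c := by
          rw [List.length_eq_zero_iff, List.filter_eq_nil_iff]
          constructor
          · intro h x hx
            have h2 := h x hx
            simp only [Bool.not_eq_true] at h2
            simp only [PySem.Set.contains] at h2
            rw [PySem.Set.mem_add]
            by_cases hxd : x ∈ done
            · exact Or.inl hxd
            · simp [hxd] at h2
              exact Or.inr h2
          · intro h x hx
            have h2 := (PySem.Set.mem_add _ _ _).mp (h x hx)
            simp [PySem.Set.contains]
            tauto
        constructor
        · intro ht
          rw [PySem.Set.issubset_iff]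
          have h1 : indeg.getD p 0 = 1 := by simpa using ht
          rw [hind p] at h1
          have h0 : (((chB.getD p PySem.Set.empty).filter
              (fun y => !(PySem.Set.contains (PySem.Set.add done c) y))).length : Int) = 0 := by
            omega
          exact hz.mp (by exact_mod_cast h0)
        · intro ht
          have hsub := (PySem.Set.issubset_iff _ _).mp ht
          have h0 : (((chB.getD p PySem.Set.empty).filter
              (fun y => !(PySem.Set.contains (PySem.Set.add done c) y))).length : Int) = 0 := by
            exact_mod_cast congrArg (Nat.cast : Nat → Int) (hz.mpr hsub)
          have : indeg.getD p 0 = 1 := by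
            rw [hind p]
            omega
          simpa using this
      -- the new invariants
      have hfreed : ∀ p ∈ (pvPop (parentsB.getD c []) (indeg, [])).2,
          p ∈ parentsB.getD c [] ∧ (∀ x ∈ chB.getD p PySem.Set.empty, x ∈ PySem.Set.add done c) := by
        intro p hp
        rw [hfe] at hp
        have h1 := List.mem_filter.mp hp
        exact ⟨h1.1, (PySem.Set.issubset_iff _ _).mp h1.2⟩
      have hnd' : (rest ++ (pvPop (parentsB.getD c []) (indeg, [])).2).Nodup := by
        rw [List.nodup_append]
        refine ⟨hqr.2, by rw [hfe]; exact (hGnd c).filter _, ?_⟩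
        intro p hpr q hqf e
        subst e
        obtain ⟨hpG, _⟩ := hfreed p hqf
        have hcp : c ∈ chB.getD p PySem.Set.empty := (hpar c p).mp hpG
        exact hcd ((hmem p (List.mem_cons_of_mem _ hpr)).2 c hcp)
      have hmem' : ∀ p ∈ rest ++ (pvPop (parentsB.getD c []) (indeg, [])).2,
          p ∉ PySem.Set.add done c ∧
            ∀ x ∈ chB.getD p PySem.Set.empty, x ∈ PySem.Set.add done c := by
        intro p hp
        rcases List.mem_append.mp hp with hpr | hpf
        · obtain ⟨hpd, hpch⟩ := hmem p (List.mem_cons_of_mem _ hpr)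
          refine ⟨?_, fun x hx => (PySem.Set.mem_add _ _ _).mpr (Or.inl (hpch x hx))⟩
          intro hmem2
          rcases (PySem.Set.mem_add _ _ _).mp hmem2 with h | h
          · exact hpd h
          · exact hqr.1 (h ▸ hpr)
        · obtain ⟨hpG, hpch⟩ := hfreed p hpf
          have hcp : c ∈ chB.getD p PySem.Set.empty := (hpar c p).mp hpG
          refine ⟨?_, hpch⟩
          intro hmem2
          rcases (PySem.Set.mem_add _ _ _).mp hmem2 with h | h
          · exact hcd (hcl p h c hcp)
          · exact hirr p (h ▸ hcp)
      have hcl' : ∀ p, p ∈ PySem.Set.add done c →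
          ∀ x ∈ chB.getD p PySem.Set.empty, x ∈ PySem.Set.add done c := by
        intro p hp x hx
        rcases (PySem.Set.mem_add _ _ _).mp hp with h | h
        · exact (PySem.Set.mem_add _ _ _).mpr (Or.inl (hcl p h x hx))
        · exact (PySem.Set.mem_add _ _ _).mpr (Or.inl (hcch x (h ▸ hx)))
      have hind' : ∀ x, (pvPop (parentsB.getD c []) (indeg, [])).1.getD x 0
          = (((chB.getD x PySem.Set.empty).filter
              (fun y => !(PySem.Set.contains (PySem.Set.add done c) y))).length : Int) := by
        intro x
        rw [hp1 x, hind x, pvCnt_add (chB.getD x PySem.Set.empty) (hchnd x) done c hcd]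
        have hiff : (x ∈ parentsB.getD c []) ↔ (c ∈ chB.getD x PySem.Set.empty) := hpar c x
        by_cases hxg : x ∈ parentsB.getD c []
        · rw [if_pos hxg, if_pos (hiff.mp hxg)]
        · rw [if_neg hxg, if_neg (fun h => hxg (hiff.mpr h))]
      rw [pvKahnA_cons, hG c]
      show _ = c :: pvLoopB parentsB chB f (PySem.Set.add done c)
        (rest ++ (parentsB.getD c []).filter
          (fun p => PySem.Set.issubset (chB.getD p PySem.Set.empty) (PySem.Set.add done c)))
      rw [← hfe]
      exact congrArg (c :: ·) (ih _ _ _ hnd' hmem' hcl' hind')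

-- ===== VERDICT (moved below) =====
theorem topological_child_first_py_spec : Claim_equal_topological_child_first_py := by
  intro nodes deps _hdom hpre
  unfold Spec_topological_child_first_py
  obtain ⟨hk, hps⟩ := hpre
  have hns : (PySem.Set.ofList nodes).Nodup := PySem.Set.nodup_ofList nodes
  obtain ⟨g1, g2, g3, g4, g5, g6⟩ :=
    pvBuild_grand (PySem.Set.ofList nodes) deps
      ((PySem.Set.ofList nodes).foldl (fun d n => d.insert n (0 : Int)) PySem.Dict.empty,
       (PySem.Set.ofList nodes).foldl (fun d n => d.insert n PySem.Set.empty) PySem.Dict.empty)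
      (PySem.Dict.empty,
       (PySem.Set.ofList nodes).foldl (fun d n => d.insert n PySem.Set.empty) PySem.Dict.empty)
      hk hps
      (fun cp _ => pvAdj0_getD_aux _ PySem.Dict.empty (fun _ => rfl) cp.1)
      (fun cp _ p => by
        rw [pvAdj0_getD_aux _ PySem.Dict.empty (fun _ => rfl) p]
        simp [PySem.Set.empty])
      (fun c => by rw [pvAdj0_getD_aux _ PySem.Dict.empty (fun _ => rfl) c]; rfl)
      (fun c => by rw [pvAdj0_getD_aux _ PySem.Dict.empty (fun _ => rfl) c]; exact List.nodup_nil)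
      (fun p => by rw [pvAdj0_getD_aux _ PySem.Dict.empty (fun _ => rfl) p]; exact List.nodup_nil)
      (fun c p => by
        rw [pvAdj0_getD_aux _ PySem.Dict.empty (fun _ => rfl) p]
        simp [PySem.Set.empty, PySem.Dict.getD_empty])
      (fun p => by
        rw [pvAdj0_getD_aux _ PySem.Dict.empty (fun _ => rfl) p]
        simp [PySem.Set.empty])
      (fun x => by
        rw [pvIndeg0_getD _ PySem.Dict.empty (fun _ => rfl) x,
          pvAdj0_getD_aux _ PySem.Dict.empty (fun _ => rfl) x]
        rfl)
  -- restate the grand facts against the ports (definitionally equal states)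
  have hG : ∀ c, PySem.List.sorted
      ((pvBuildA (PySem.Set.ofList nodes) deps).2.getD c PySem.Set.empty) (fun x => x.toList) false
      = (pvBuildB (PySem.Set.ofList nodes) deps).1.getD c [] := g1
  have hAnd : ∀ c, ((pvBuildA (PySem.Set.ofList nodes) deps).2.getD c PySem.Set.empty).Nodup := g2
  have hchnd : ∀ p, ((pvBuildB (PySem.Set.ofList nodes) deps).2.getD p PySem.Set.empty).Nodup := g3
  have hpar : ∀ c p, p ∈ (pvBuildB (PySem.Set.ofList nodes) deps).1.getD c []
      ↔ c ∈ (pvBuildB (PySem.Set.ofList nodes) deps).2.getD p PySem.Set.empty := g4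
  have hirr : ∀ p, p ∉ (pvBuildB (PySem.Set.ofList nodes) deps).2.getD p PySem.Set.empty := g5
  have hcnt : ∀ x, (pvBuildA (PySem.Set.ofList nodes) deps).1.getD x 0
      = (((pvBuildB (PySem.Set.ofList nodes) deps).2.getD x PySem.Set.empty).length : Int) := g6
  have hGnd : ∀ c, ((pvBuildB (PySem.Set.ofList nodes) deps).1.getD c []).Nodup := by
    intro c
    rw [← hG c]
    exact (PySem.List.sorted_perm _ _ _).symm.nodup (hAnd c)
  -- the initial frontier
  have hkeys : ((pvBuildA (PySem.Set.ofList nodes) deps).1).keys = PySem.Set.ofList nodes := by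
    rw [pvBuildA_fst, pvIndegBuild_keys _ _ _ (fun p hp => by
      rw [pvIndeg0_keys _ hns]; exact hp)]
    exact pvIndeg0_keys _ hns
  have hpredeq : ∀ n, ((pvBuildA (PySem.Set.ofList nodes) deps).1.getD n 0 == (0 : Int))
      = ((pvBuildB (PySem.Set.ofList nodes) deps).2.getD n PySem.Set.empty).isEmpty := by
    intro n
    rw [Bool.eq_iff_iff, hcnt n]
    simp [List.isEmpty_iff, List.length_eq_zero_iff]
  have hfilter : (PySem.Set.ofList nodes).filter
        (fun n => (pvBuildA (PySem.Set.ofList nodes) deps).1.getD n 0 == (0 : Int))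
      = (PySem.Set.ofList nodes).filter
        (fun n => ((pvBuildB (PySem.Set.ofList nodes) deps).2.getD n PySem.Set.empty).isEmpty) :=
    List.filter_congr (fun n _ => hpredeq n)
  -- empty done set facts
  have hc0 : ∀ y : String, (PySem.Set.contains (PySem.Set.empty : PySem.Set String) y) = false :=
    fun _ => rfl
  have horder : pvKahnA (2 * (PySem.Set.ofList nodes).length + 1)
      (PySem.List.sorted ((PySem.Set.ofList nodes).filter
        (fun n => ((pvBuildB (PySem.Set.ofList nodes) deps).2.getD n PySem.Set.empty).isEmpty))
        (fun x => x.toList) false)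
      (pvBuildA (PySem.Set.ofList nodes) deps).1 (pvBuildA (PySem.Set.ofList nodes) deps).2
      = pvLoopB (pvBuildB (PySem.Set.ofList nodes) deps).1 (pvBuildB (PySem.Set.ofList nodes) deps).2
        (2 * (PySem.Set.ofList nodes).length + 1) PySem.Set.empty
        (PySem.List.sorted ((PySem.Set.ofList nodes).filter
          (fun n => ((pvBuildB (PySem.Set.ofList nodes) deps).2.getD n PySem.Set.empty).isEmpty))
          (fun x => x.toList) false) := by
    apply pvLoop_eq _ _ _ hG hGnd hpar hchnd hirr
    · exact (PySem.List.sorted_perm _ _ _).symm.nodup (hns.filter _)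
    · intro p hp
      have hp2 := (PySem.List.mem_sorted _ _ _ _).mp hp
      have hp3 := List.mem_filter.mp hp2
      have hemp : (pvBuildB (PySem.Set.ofList nodes) deps).2.getD p PySem.Set.empty = [] :=
        List.isEmpty_iff.mp hp3.2
      constructor
      · simp [PySem.Set.empty]
      · intro c hc
        rw [hemp] at hc
        exact absurd hc (List.not_mem_nil)
    · intro p hp
      exact absurd hp (by simp [PySem.Set.empty])
    · intro x
      rw [hcnt x]
      simp
  -- assemble
  show topological_child_first_py nodes deps = topological_child_first_py_alt nodes deps
  simp only [topological_child_first_py, topological_child_first_py_alt]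
  rw [pvFrontier_eq _ _ hkeys hns, hfilter, horder]
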